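-- pv_equiv track=rewrite | github.com/semarillion/tracks | tracks_aux.py | f_FindValuesCloseToMultiple
-- ===== SOURCE A (Python) =====
-- def f_closestPoint(pair,multiple):
--     """
--     This function identifies from two two points of distance, which is closest to the fixed value.
--     The fixed value is multiple -> DISTANCE
--     @param pair: to distance values
--     @type pair: tuple (two values)
--     @param multiple: defined distance
--     @type multiple: int
--     @return: result of which point is closer to DISTANCE
--     @rtype: float
--     """
--     #extract the tuple
--     a,b=pair
--
--     # based on the abs difference to a number return either a or b
--     if abs(a-multiple) >= abs(b-multiple):
--         return b
--     else:
--         return a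
--
-- def f_FindValuesCloseToMultiple(list_of_disctances, multiple_of):
--     ''' returns a list of TrueFalse which indicate whether distance value a multiple of "multiple_of -> DISTANCE"
--         @param list_of_disctances: list of recordes distances from start
--         @type list_of_disctances: list
--         @param multiple_of: equal to DISTANCE
--         @type multiple_of: int
--         @return: list where a distance (from start) is very close to a multiple of DISTANCE
--         @rtype: list
--         '''
--
--     Match=[]                                               # definition of the return value
--     multiple=multiple_of                                   # save the initial value of the multiple
--     Match_l=[]
--
--     # continue as long the end of the list has not been readched
--     while(multiple<=max(list_of_disctances)):
--         number=0
--
--         # iterate of the list whith a window of two elements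
--         for i in range(0, len(list_of_disctances) - 1):
--             a,b= list_of_disctances[i:i + 2]
--
--             # if one number is below and the other number is above the multiple
--             if a < multiple and b > multiple:
--                 # check which number of both is closest to the mulitple
--                 number = f_closestPoint((a,b),multiple)
--             else:
--                 continue
--
--         # append the found distance (from start) to a list
--         Match.append(number)
--
--         # and update the number for the next cycle
--         multiple+=multiple_of
--
--     # create list where 1 indicates a multiple was found
--     for i in list_of_disctances:
--         if i in Match:
--             Match_l.append(1)
--         else:
--             Match_l.append(0)
--     Match_l[0]=1    # first ohne needs to be used allways
--
--     return Match_l   # return the list of numbers which are close the the multiple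
-- ===== SOURCE B (Python) =====
-- def f_FindValuesCloseToMultiple(list_of_disctances, multiple_of):
--     # One pass over consecutive pairs: each pair writes its closer endpoint into a slot
--     # array indexed by the multiples it straddles (later pairs overwrite earlier ones);
--     # the 0/1 result is then a set-membership test over the recorded points.
--     mx = max(list_of_disctances)
--     nmult = max(mx // multiple_of, 0)
--     recorded = [0] * nmult  # slot k - 1 holds the point recorded for the multiple k * multiple_of
--     for i in range(len(list_of_disctances) - 1):
--         a = list_of_disctances[i]
--         b = list_of_disctances[i + 1]
--         lo = max(a // multiple_of + 1, 1)
--         hi = min((b - 1) // multiple_of, nmult)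
--         for k in range(lo, hi + 1):
--             m = k * multiple_of
--             recorded[k - 1] = b if abs(a - m) >= abs(b - m) else a
--     match = set(recorded)
--     result = [1 if x in match else 0 for x in list_of_disctances]
--     result[0] = 1
--     return result
-- ===== Notes on version B (the rewrite author's own statement) =====
-- stated objective: alternative
-- what changed: A rescans every consecutive pair of the list once per multiple of multiple_of up to max(list); B makes one pass over the consecutive pairs, writing the closer endpoint into a slot array indexed by the multiples the pair straddles (later pairs overwrite), then builds the 0/1 result by set membership over the recorded slots (intended to remove the per-multiple rescan; a timing run did not consistently confirm a speed-up, so none is claimed); …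
-- outside the precondition, e.g. on f_FindValuesCloseToMultiple([-5, -7], 0): A returns [1, 0], B raises ZeroDivisionError; on f_FindValuesCloseToMultiple([-5], -3): A returns [1], B returns [1]
import Mathlib
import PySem

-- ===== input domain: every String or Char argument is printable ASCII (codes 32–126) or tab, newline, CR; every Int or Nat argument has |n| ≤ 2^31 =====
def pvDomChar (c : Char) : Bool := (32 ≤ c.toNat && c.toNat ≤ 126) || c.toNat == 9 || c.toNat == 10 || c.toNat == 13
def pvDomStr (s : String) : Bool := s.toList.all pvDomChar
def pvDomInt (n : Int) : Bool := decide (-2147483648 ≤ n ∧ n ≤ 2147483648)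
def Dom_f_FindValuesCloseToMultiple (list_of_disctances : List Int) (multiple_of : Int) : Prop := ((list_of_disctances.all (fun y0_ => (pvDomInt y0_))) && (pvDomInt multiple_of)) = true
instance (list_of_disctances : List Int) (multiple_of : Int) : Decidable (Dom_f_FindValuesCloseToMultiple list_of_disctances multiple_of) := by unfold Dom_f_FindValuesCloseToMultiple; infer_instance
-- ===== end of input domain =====

-- B replaces A's rescan of the whole list for every multiple by ONE pass over consecutive
-- pairs that records the closer endpoint in a slot array indexed by the multiples the pair
-- straddles: one pass over the pairs instead of A's rescan of the list per multiple.

-- ===== PORT A =====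
-- helper from the same module
def f_closestPoint (pair : Int × Int) (multiple : Int) : Int :=
  if |pair.1 - multiple| ≥ |pair.2 - multiple| then pair.2 else pair.1

def f_FindValuesCloseToMultiple (list_of_disctances : List Int) (multiple_of : Int) : List Int :=
  -- max(list_of_disctances): raises ValueError on []; Pre_ excludes the empty list
  let mx := (PySem.List.max? list_of_disctances (fun x => x)).getD 0
  -- 'while multiple <= max(...): ... multiple += multiple_of' visits exactly
  -- range(multiple_of, mx+1, multiple_of) (under Pre_, 0 < multiple_of; on multiple_of ≤ 0 the Python loops forever)
  let Match := (PySem.List.pyRange multiple_of (mx + 1) multiple_of).map (fun multiple =>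
    (PySem.List.pyRange 0 (PySem.List.len list_of_disctances - 1) 1).foldl (fun number i =>
      -- a, b = list_of_disctances[i:i+2]  (always exactly two elements for i in range(len-1))
      match PySem.List.slice list_of_disctances (some i) (some (i + 2)) with
      | [a, b] => if a < multiple ∧ b > multiple then f_closestPoint (a, b) multiple else number
      | _ => number) (0 : Int))
  let Match_l := list_of_disctances.map (fun i => if i ∈ Match then (1 : Int) else 0)
  -- Match_l[0] = 1  (IndexError on []; Pre_ excludes the empty list)
  PySem.List.pySetD Match_l 0 1

-- ===== PORT B =====
def f_FindValuesCloseToMultiple_alt (list_of_disctances : List Int) (multiple_of : Int) : List Int :=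
  let mx := (PySem.List.max? list_of_disctances (fun x => x)).getD 0
  let nmult := max (PySem.Int.floordiv mx multiple_of) 0
  let recorded : Array Int := Array.replicate nmult.toNat 0
  let recorded := (PySem.List.pyRange 0 (PySem.List.len list_of_disctances - 1) 1).foldl
    (fun (recorded : Array Int) i =>
      let a := PySem.List.pyGetD list_of_disctances i 0
      let b := PySem.List.pyGetD list_of_disctances (i + 1) 0
      let lo := max (PySem.Int.floordiv a multiple_of + 1) 1
      let hi := min (PySem.Int.floordiv (b - 1) multiple_of) nmult
      (PySem.List.pyRange lo (hi + 1) 1).foldl (fun recorded k =>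
        let m := k * multiple_of
        recorded.setIfInBounds (k - 1).toNat (if |a - m| ≥ |b - m| then b else a)) recorded)
    recorded
  -- set(recorded)
  let matchSet : PySem.Set Int := PySem.Set.ofList recorded.toList
  PySem.List.pySetD (list_of_disctances.map (fun x => if x ∈ matchSet then (1 : Int) else 0)) 0 1

-- ===== PRECONDITION & SPEC =====
-- Pre_ excludes the empty list (max() raises ValueError) and multiple_of ≤ 0, on which A
-- loops forever except in the degenerate case multiple_of > max(list) (B's floor divisions
-- would raise ZeroDivisionError for multiple_of = 0 there).
def Pre_f_FindValuesCloseToMultiple (list_of_disctances : List Int) (multiple_of : Int) : Prop :=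
  list_of_disctances ≠ [] ∧ 0 < multiple_of
instance (list_of_disctances : List Int) (multiple_of : Int) : Decidable (Pre_f_FindValuesCloseToMultiple list_of_disctances multiple_of) := by unfold Pre_f_FindValuesCloseToMultiple; infer_instance

def pvWitness_f_FindValuesCloseToMultiple : List Int × Int := ([1, 6, 11], 5)

def Spec_f_FindValuesCloseToMultiple (list_of_disctances : List Int) (multiple_of : Int) (out : List Int) : Prop := out = f_FindValuesCloseToMultiple_alt list_of_disctances multiple_of
instance (list_of_disctances : List Int) (multiple_of : Int) (out : List Int) : Decidable (Spec_f_FindValuesCloseToMultiple list_of_disctances multiple_of out) := by unfold Spec_f_FindValuesCloseToMultiple; infer_instance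

-- ===== CLAIM (what is proved, stated in full; the proofs are below) =====
def Claim_equal_f_FindValuesCloseToMultiple : Prop := ∀ (list_of_disctances : List Int) (multiple_of : Int), Dom_f_FindValuesCloseToMultiple list_of_disctances multiple_of → Pre_f_FindValuesCloseToMultiple list_of_disctances multiple_of → Spec_f_FindValuesCloseToMultiple list_of_disctances multiple_of (f_FindValuesCloseToMultiple list_of_disctances multiple_of)

-- ===== LEMMAS AND PROOFS =====

lemma pv_optShift {α β : Type} (c : β → Prop) [DecidablePred c] (g : β → α) (P : List β)
    (o : Option α) :
    P.foldl (fun o p => if c p then some (g p) else o) o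
      = (P.foldl (fun o p => if c p then some (g p) else o) none).elim o some := by
  induction P generalizing o with
  | nil => simp
  | cons p P ih =>
    simp only [List.foldl_cons]
    by_cases h : c p
    · simp only [h, if_pos]
      rw [ih (some (g p))]
      cases P.foldl (fun o p => if c p then some (g p) else o) none <;> simp
    · simp only [h, ite_false]
      exact ih o

lemma pv_foldA_eq {α β : Type} (c : β → Prop) [DecidablePred c] (g : β → α) (P : List β) (z : α) :
    P.foldl (fun acc p => if c p then g p else acc) z
      = (P.foldl (fun o p => if c p then some (g p) else o) none).getD z := by
  induction P generalizing z with
  | nil => simp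
  | cons p P ih =>
    simp only [List.foldl_cons]
    by_cases h : c p
    · simp only [h, if_pos]
      rw [ih (g p), pv_optShift c g P (some (g p))]
      cases P.foldl (fun o p => if c p then some (g p) else o) none <;> simp
    · simp only [h, ite_false]
      exact ih z

def pvPairs (xs : List Int) : List (Int × Int) := xs.zip xs.tail

lemma pv_foldl_range_pairs {β : Type} (f : β → Int → Int → β) :
    ∀ (xs : List Int) (init : β),
    (List.range (xs.length - 1)).foldl (fun s k => f s (xs.getD k 0) (xs.getD (k + 1) 0)) init
      = (pvPairs xs).foldl (fun s p => f s p.1 p.2) init := by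
  intro xs
  induction xs with
  | nil => intro init; simp [pvPairs]
  | cons x t ih =>
    intro init
    cases t with
    | nil => simp [pvPairs]
    | cons y t' =>
      simp only [List.length_cons, Nat.add_sub_cancel, List.range_succ_eq_map,
        List.foldl_cons, List.foldl_map]
      have h1 : (x :: y :: t').getD 0 0 = x := rfl
      have h2 : (x :: y :: t').getD 1 0 = y := rfl
      rw [h1, h2]
      have : ∀ (k : Nat), (x :: y :: t').getD (k + 1) 0 = (y :: t').getD k 0 := fun k => rfl
      have hpairs : pvPairs (x :: y :: t') = (x, y) :: pvPairs (y :: t') := rfl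
      rw [hpairs, List.foldl_cons]
      have := ih (f init x y)
      simp only [List.length_cons, Nat.add_sub_cancel] at this
      rw [← this]
      rfl

abbrev pvMult (mo mx m : Int) : Prop := mo ∣ m ∧ mo ≤ m ∧ m ≤ mx

abbrev pvC (mo mx m : Int) (p : Int × Int) : Prop := pvMult mo mx m ∧ p.1 < m ∧ m < p.2

def pvCp (a b m : Int) : Int := if |a - m| ≥ |b - m| then b else a

def pvInnerA (m : Int) (P : List (Int × Int)) : Option Int :=
  P.foldl (fun o p => if p.1 < m ∧ p.2 > m then some (pvCp p.1 p.2 m) else o) none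

def pvInner (mo mx m : Int) (P : List (Int × Int)) : Option Int :=
  P.foldl (fun o p => if pvC mo mx m p then some (pvCp p.1 p.2 m) else o) none

lemma pv_inner_eq_innerA (mo mx m : Int) (hm : pvMult mo mx m) (P : List (Int × Int)) :
    pvInner mo mx m P = pvInnerA m P := by
  rw [pvInner, pvInnerA]
  exact PySem.List.foldl_congr_mem _ _ _ none
    (by intro acc p _; exact if_congr ⟨fun hc => hc.2, fun hc => ⟨hm, hc⟩⟩ rfl rfl)

lemma pv_mem_mults (mo mx m : Int) (hmo : 0 < mo) :
    m ∈ PySem.List.pyRange mo (mx + 1) mo ↔ pvMult mo mx m := by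
  rw [PySem.List.mem_pyRange_iff_of_pos hmo]
  constructor
  · rintro ⟨h1, h2, h3⟩
    refine ⟨?_, h1, by omega⟩
    have := dvd_add h3 (dvd_refl mo)
    simpa using this
  · rintro ⟨h1, h2, h3⟩
    exact ⟨h2, by omega, dvd_sub h1 (dvd_refl mo)⟩

lemma pv_slice_two (xs : List Int) (k : Nat) (hk : k + 1 < xs.length) :
    PySem.List.slice xs (some (k : Int)) (some ((k : Int) + 2)) = [xs.getD k 0, xs.getD (k + 1) 0] := by
  have h2 : ((k : Int) + 2) = (((k + 2 : Nat)) : Int) := by push_cast; ring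
  rw [h2, PySem.List.slice_natCast]
  have h3 : k + 2 - k = 2 := by omega
  have e1 : xs.drop k = xs[k] :: xs.drop (k + 1) := List.drop_eq_getElem_cons (by omega)
  have e2 : xs.drop (k + 1) = xs[k + 1] :: xs.drop (k + 2) := List.drop_eq_getElem_cons (by omega)
  rw [h3, e1, e2, List.getD_eq_getElem xs 0 (Nat.lt_of_succ_lt hk), List.getD_eq_getElem xs 0 hk]
  rfl

lemma pv_bodyA (xs : List Int) (hne : xs ≠ []) (m : Int) :
    (PySem.List.pyRange 0 (PySem.List.len xs - 1) 1).foldl (fun number i =>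
      match PySem.List.slice xs (some i) (some (i + 2)) with
      | [a, b] => if a < m ∧ b > m then f_closestPoint (a, b) m else number
      | _ => number) (0 : Int)
    = (pvInnerA m (pvPairs xs)).getD 0 := by
  have hpos : 0 < xs.length := by
    cases xs
    · exact absurd rfl hne
    · simp
  have hlen : PySem.List.len xs - 1 = ((xs.length - 1 : Nat) : Int) := by
    rw [PySem.List.len_eq]; omega
  rw [hlen, PySem.List.pyRange_zero_nat, List.foldl_map]
  refine Eq.trans (PySem.List.foldl_congr_mem _ _
    (fun number k => if xs.getD k 0 < m ∧ xs.getD (k + 1) 0 > m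
      then pvCp (xs.getD k 0) (xs.getD (k + 1) 0) m else number) 0 ?_)
    (Eq.trans (pv_foldl_range_pairs (fun num a b => if a < m ∧ b > m then pvCp a b m else num) xs 0)
      (pv_foldA_eq (fun p : Int × Int => p.1 < m ∧ p.2 > m) (fun p => pvCp p.1 p.2 m) _ 0))
  intro acc k hk
  rw [List.mem_range] at hk
  have hk1 : k + 1 < xs.length := by omega
  rw [pv_slice_two xs k hk1]
  rfl


-- B's per-pair slot-array update (slot k-1 for the multiple k*mo)
def pvStepA (mo nmult : Int) (W : Array Int) (a b : Int) : Array Int :=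
  (PySem.List.pyRange (max (PySem.Int.floordiv a mo + 1) 1)
      (min (PySem.Int.floordiv (b - 1) mo) nmult + 1) 1).foldl
    (fun W k => W.setIfInBounds (k - 1).toNat (pvCp a b (k * mo))) W

def pvWinner (mo nmult : Int) (P : List (Int × Int)) : Array Int :=
  P.foldl (fun W p => pvStepA mo nmult W p.1 p.2) (Array.replicate nmult.toNat 0)

lemma pv_size_stepA (mo nmult : Int) (W : Array Int) (a b : Int) :
    (pvStepA mo nmult W a b).size = W.size := by
  rw [pvStepA]
  generalize PySem.List.pyRange (max (PySem.Int.floordiv a mo + 1) 1)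
      (min (PySem.Int.floordiv (b - 1) mo) nmult + 1) 1 = L
  induction L generalizing W with
  | nil => rfl
  | cons j L ih => rw [List.foldl_cons, ih, Array.size_setIfInBounds]

lemma pv_size_winner (mo nmult : Int) (P : List (Int × Int)) :
    (pvWinner mo nmult P).size = nmult.toNat := by
  rw [pvWinner]
  have : ∀ (W : Array Int), (P.foldl (fun W p => pvStepA mo nmult W p.1 p.2) W).size = W.size := by
    induction P with
    | nil => intro W; rfl
    | cons p P ih => intro W; rw [List.foldl_cons, ih, pv_size_stepA]
  rw [this, Array.size_replicate]

lemma pv_get_foldl_set (key : Int → Nat) (val : Int → Int) (v : Int) (k : Nat)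
    (L : List Int) (W : Array Int) (hk : k < W.size)
    (hv : ∀ j ∈ L, key j = k → val j = v) :
    (L.foldl (fun W j => W.setIfInBounds (key j) (val j)) W)[k]?
      = if ∃ j ∈ L, key j = k then some v else W[k]? := by
  induction L generalizing W with
  | nil => simp
  | cons j L ih =>
    rw [List.foldl_cons]
    rw [ih _ (by rw [Array.size_setIfInBounds]; exact hk)
      (fun j' hj' => hv j' (List.mem_cons_of_mem _ hj'))]
    by_cases hL : ∃ j' ∈ L, key j' = k
    · have : ∃ j' ∈ j :: L, key j' = k := by
        obtain ⟨j', hj', he⟩ := hL; exact ⟨j', List.mem_cons_of_mem _ hj', he⟩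
      rw [if_pos hL, if_pos this]
    · rw [if_neg hL]
      by_cases hj : key j = k
      · have he : ∃ j' ∈ j :: L, key j' = k := ⟨j, List.mem_cons_self, hj⟩
        rw [if_pos he, Array.getElem?_setIfInBounds, if_pos hj, if_pos (hj ▸ hk),
          hv j List.mem_cons_self hj]
      · have he : ¬ ∃ j' ∈ j :: L, key j' = k := by
          rintro ⟨j', hj', hkk⟩
          rcases List.mem_cons.mp hj' with rfl | h
          · exact hj hkk
          · exact hL ⟨j', h, hkk⟩
        rw [if_neg he, Array.getElem?_setIfInBounds, if_neg hj]

lemma pv_stepA_get (mo mx nmult : Int) (hmo : 0 < mo)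
    (hn : nmult = max (PySem.Int.floordiv mx mo) 0) (a b : Int)
    (W : Array Int) (k : Nat) (hk : k < W.size) :
    (pvStepA mo nmult W a b)[k]?
      = if pvC mo mx (((k : Int) + 1) * mo) (a, b)
        then some (pvCp a b (((k : Int) + 1) * mo)) else W[k]? := by
  rw [pvStepA]
  rw [pv_get_foldl_set (fun j => (j - 1).toNat) (fun j => pvCp a b (j * mo))
    (pvCp a b (((k : Int) + 1) * mo)) k _ W hk ?hv]
  case hv =>
    intro j hj hkey
    replace hkey : (j - 1).toNat = k := hkey
    rw [PySem.List.mem_pyRange_one] at hj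
    have hj1 : 1 ≤ j := le_trans (le_max_right _ _) hj.1
    have hj2 : j = (k : Int) + 1 := by omega
    rw [hj2]
  have hiff : (∃ j ∈ PySem.List.pyRange (max (PySem.Int.floordiv a mo + 1) 1)
        (min (PySem.Int.floordiv (b - 1) mo) nmult + 1) 1, (j - 1).toNat = k)
      ↔ pvC mo mx (((k : Int) + 1) * mo) (a, b) := by
    constructor
    · rintro ⟨j, hj, hkey⟩
      replace hkey : (j - 1).toNat = k := hkey
      rw [PySem.List.mem_pyRange_one, max_le_iff, Int.lt_add_one_iff, le_min_iff] at hj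
      obtain ⟨⟨h1, h2⟩, h3, h4⟩ := hj
      have hjk : j = (k : Int) + 1 := by omega
      subst hjk
      rw [Int.add_one_le_iff, PySem.Int.floordiv_lt_iff_lt_mul hmo] at h1
      rw [PySem.Int.le_floordiv_iff_mul_le hmo] at h3
      have hmx : ((k : Int) + 1) * mo ≤ mx := by
        have hfd : (k : Int) + 1 ≤ PySem.Int.floordiv mx mo := by omega
        rw [PySem.Int.le_floordiv_iff_mul_le hmo] at hfd
        exact hfd
      refine ⟨⟨⟨(k : Int) + 1, mul_comm _ _⟩, by nlinarith, hmx⟩, h1, by omega⟩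
    · rintro ⟨⟨⟨j, hjm⟩, hge, hle⟩, hab1, hab2⟩
      refine ⟨(k : Int) + 1, ?_, by simp⟩
      rw [PySem.List.mem_pyRange_one, max_le_iff, Int.lt_add_one_iff, le_min_iff,
        Int.add_one_le_iff, PySem.Int.floordiv_lt_iff_lt_mul hmo,
        PySem.Int.le_floordiv_iff_mul_le hmo]
      have hfd : (k : Int) + 1 ≤ PySem.Int.floordiv mx mo := by
        rw [PySem.Int.le_floordiv_iff_mul_le hmo]; exact hle
      refine ⟨⟨hab1, by omega⟩, by omega, by omega⟩
  exact if_congr hiff rfl rfl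

lemma pv_fold_winner (mo mx nmult : Int) (hmo : 0 < mo)
    (hn : nmult = max (PySem.Int.floordiv mx mo) 0) (k : Nat) :
    ∀ (P : List (Int × Int)) (W : Array Int), k < W.size →
    (P.foldl (fun W p => pvStepA mo nmult W p.1 p.2) W)[k]?
      = (pvInner mo mx (((k : Int) + 1) * mo) P).elim (W[k]?) (fun v => some v) := by
  intro P
  induction P with
  | nil => intro W hk; simp [pvInner]
  | cons p P ih =>
    intro W hk
    rw [List.foldl_cons]
    rw [ih _ (by rw [pv_size_stepA]; exact hk)]
    rw [pv_stepA_get mo mx nmult hmo hn p.1 p.2 W k hk]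
    have hstep : pvInner mo mx (((k : Int) + 1) * mo) (p :: P)
        = (pvInner mo mx (((k : Int) + 1) * mo) P).elim
            (if pvC mo mx (((k : Int) + 1) * mo) p
              then some (pvCp p.1 p.2 (((k : Int) + 1) * mo)) else none) some := by
      rw [pvInner, List.foldl_cons,
        pv_optShift (pvC mo mx (((k : Int) + 1) * mo)) (fun q => pvCp q.1 q.2 (((k : Int) + 1) * mo))]
      rfl
    rw [hstep]
    simp only [Prod.mk.eta]
    cases pvInner mo mx (((k : Int) + 1) * mo) P with
    | none =>
      by_cases h : pvC mo mx (((k : Int) + 1) * mo) p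
      · rw [if_pos h, if_pos h]; rfl
      · rw [if_neg h, if_neg h]; rfl
    | some v => simp

lemma pv_winner_get (mo mx nmult : Int) (hmo : 0 < mo)
    (hn : nmult = max (PySem.Int.floordiv mx mo) 0) (P : List (Int × Int)) (k : Nat)
    (hk : k < nmult.toNat) :
    (pvWinner mo nmult P)[k]? = some ((pvInner mo mx (((k : Int) + 1) * mo) P).getD 0) := by
  rw [pvWinner, pv_fold_winner mo mx nmult hmo hn k P _ (by rw [Array.size_replicate]; exact hk)]
  rw [Array.getElem?_replicate, if_pos hk]
  cases pvInner mo mx (((k : Int) + 1) * mo) P <;> rfl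

-- the multiples of the outer loop are exactly the slots 0..nmult-1
lemma pv_mult_iff_slot (mo mx m : Int) (hmo : 0 < mo) :
    pvMult mo mx m
      ↔ ∃ k : Nat, k < (max (PySem.Int.floordiv mx mo) 0).toNat ∧ m = ((k : Int) + 1) * mo := by
  constructor
  · rintro ⟨⟨j, rfl⟩, hge, hle⟩
    rw [mul_comm] at hge hle ⊢
    have hj1 : 1 ≤ j := by nlinarith
    have hfd : j ≤ PySem.Int.floordiv mx mo := by
      rw [PySem.Int.le_floordiv_iff_mul_le hmo]; exact hle
    refine ⟨(j - 1).toNat, by omega, ?_⟩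
    have hcast : ((j - 1).toNat : Int) + 1 = j := by omega
    rw [hcast]
  · rintro ⟨k, hk, rfl⟩
    have hfd : (k : Int) + 1 ≤ PySem.Int.floordiv mx mo := by omega
    rw [PySem.Int.le_floordiv_iff_mul_le hmo] at hfd
    exact ⟨⟨(k : Int) + 1, mul_comm _ _⟩, by nlinarith, hfd⟩

lemma pv_mem_slot (W : Array Int) (x : Int) :
    x ∈ W.toList ↔ ∃ k : Nat, k < W.size ∧ W[k]? = some x := by
  rw [List.mem_iff_getElem?]
  constructor
  · rintro ⟨n, h⟩
    obtain ⟨hlt, -⟩ := List.getElem?_eq_some_iff.mp h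
    exact ⟨n, by rw [← Array.length_toList]; omega, by rw [← Array.getElem?_toList]; exact h⟩
  · rintro ⟨n, _, h⟩
    exact ⟨n, by rw [Array.getElem?_toList]; exact h⟩

-- membership in A's Match list, restated through pvInner
lemma pv_mem_match (mo mx x : Int) (hmo : 0 < mo) (P : List (Int × Int)) :
    x ∈ (PySem.List.pyRange mo (mx + 1) mo).map (fun m => (pvInnerA m P).getD 0)
      ↔ ∃ m, pvMult mo mx m ∧ (pvInner mo mx m P).getD 0 = x := by
  rw [List.mem_map]
  constructor
  · rintro ⟨m, hmem, hval⟩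
    have hmul := (pv_mem_mults mo mx m hmo).mp hmem
    exact ⟨m, hmul, by rw [pv_inner_eq_innerA mo mx m hmul]; exact hval⟩
  · rintro ⟨m, hmul, hval⟩
    exact ⟨m, (pv_mem_mults mo mx m hmo).mpr hmul,
      by rw [← pv_inner_eq_innerA mo mx m hmul]; exact hval⟩

-- membership in B's match set (the recorded slots)
lemma pv_mem_setB (mo mx x : Int) (hmo : 0 < mo) (P : List (Int × Int)) :
    x ∈ PySem.Set.ofList ((pvWinner mo (max (PySem.Int.floordiv mx mo) 0) P).toList)
      ↔ ∃ m, pvMult mo mx m ∧ (pvInner mo mx m P).getD 0 = x := by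
  have hW := pv_winner_get mo mx (max (PySem.Int.floordiv mx mo) 0) hmo rfl P
  set nm := max (PySem.Int.floordiv mx mo) 0 with hnm
  set W := pvWinner mo nm P with hWdef
  have hsz : W.size = nm.toNat := pv_size_winner mo nm P
  rw [PySem.Set.mem_ofList, pv_mem_slot]
  constructor
  · rintro ⟨k, hk, hkv⟩
    rw [hsz] at hk
    rw [hW k hk] at hkv
    refine ⟨((k : Int) + 1) * mo, ?_, by injection hkv⟩
    rw [pv_mult_iff_slot _ _ _ hmo]
    exact ⟨k, hk, rfl⟩
  · rintro ⟨m, hmul, hval⟩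
    rw [pv_mult_iff_slot _ _ _ hmo] at hmul
    obtain ⟨k, hk, rfl⟩ := hmul
    exact ⟨k, by omega, by rw [hW k hk, hval]⟩

lemma pv_bodyB (xs : List Int) (hne : xs ≠ []) (mo nmult : Int) :
    ((PySem.List.pyRange 0 (PySem.List.len xs - 1) 1).foldl
      (fun (recorded : Array Int) i =>
        let a := PySem.List.pyGetD xs i 0
        let b := PySem.List.pyGetD xs (i + 1) 0
        let lo := max (PySem.Int.floordiv a mo + 1) 1
        let hi := min (PySem.Int.floordiv (b - 1) mo) nmult
        (PySem.List.pyRange lo (hi + 1) 1).foldl (fun recorded k =>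
          let m := k * mo
          recorded.setIfInBounds (k - 1).toNat (if |a - m| ≥ |b - m| then b else a)) recorded)
      (Array.replicate nmult.toNat 0))
    = pvWinner mo nmult (pvPairs xs) := by
  have hpos : 0 < xs.length := by
    cases xs
    · exact absurd rfl hne
    · simp
  have hlen : PySem.List.len xs - 1 = ((xs.length - 1 : Nat) : Int) := by
    rw [PySem.List.len_eq]; omega
  rw [hlen, PySem.List.pyRange_zero_nat, List.foldl_map]
  refine Eq.trans (PySem.List.foldl_congr_mem _ _
    (fun W k => pvStepA mo nmult W (xs.getD k 0) (xs.getD (k + 1) 0))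
    (Array.replicate nmult.toNat 0) ?_)
    (pv_foldl_range_pairs (fun W a b => pvStepA mo nmult W a b) xs (Array.replicate nmult.toNat 0))
  intro acc k hk
  have h1 : PySem.List.pyGetD xs (k : Int) 0 = xs.getD k 0 := PySem.List.pyGetD_natCast xs k 0
  have h2 : PySem.List.pyGetD xs ((k : Int) + 1) 0 = xs.getD (k + 1) 0 := by
    have hc : ((k : Int) + 1) = ((k + 1 : Nat) : Int) := by push_cast; ring
    rw [hc]; exact PySem.List.pyGetD_natCast xs (k + 1) 0
  simp only [h1, h2]
  rfl

-- ===== VERDICT (by name: the statement is the Claim_ definition above) =====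
theorem f_FindValuesCloseToMultiple_spec : Claim_equal_f_FindValuesCloseToMultiple := by
  intro xs mo _ hpre
  obtain ⟨hne, hmo⟩ := hpre
  unfold Spec_f_FindValuesCloseToMultiple
  rw [f_FindValuesCloseToMultiple, f_FindValuesCloseToMultiple_alt]
  rw [pv_bodyB xs hne mo (max (PySem.Int.floordiv ((PySem.List.max? xs (fun x => x)).getD 0) mo) 0)]
  set mx := (PySem.List.max? xs (fun x => x)).getD 0 with hmx
  have hMatch : (PySem.List.pyRange mo (mx + 1) mo).map
      (fun multiple =>
        (PySem.List.pyRange 0 (PySem.List.len xs - 1) 1).foldl (fun number i =>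
          match PySem.List.slice xs (some i) (some (i + 2)) with
          | [a, b] => if a < multiple ∧ b > multiple then f_closestPoint (a, b) multiple else number
          | _ => number) (0 : Int))
      = (PySem.List.pyRange mo (mx + 1) mo).map
        (fun m => (pvInnerA m (pvPairs xs)).getD 0) :=
    List.map_congr_left (fun m _ => pv_bodyA xs hne m)
  rw [hMatch]
  congr 1
  refine List.map_congr_left ?_
  intro x _
  exact if_congr ((pv_mem_match mo mx x hmo (pvPairs xs)).trans
    (pv_mem_setB mo mx x hmo (pvPairs xs)).symm) rfl rfl
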